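-- pv_equiv track=rewrite | github.com/Taher-10/Documents-agent-system | agent_compliance/pdf_parser/docling_parser.py | _order_removed_lines
-- ===== SOURCE A (Python) =====
-- def _order_removed_lines(
--     removed_lines: set[str],
--     canonical_to_original: dict[str, str],
--     header_candidates: set[str],
--     footer_candidates: set[str],
--     header_blocks: list[tuple[str, ...]],
--     footer_blocks: list[tuple[str, ...]],
-- ) -> list[str]:
--     ordered: list[str] = []
--
--     canonical_order = sorted(header_candidates | footer_candidates)
--     for canonical in canonical_order:
--         original = canonical_to_original.get(canonical)
--         if original and original in removed_lines and original not in ordered: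
--             ordered.append(original)
--
--     for block in header_blocks + footer_blocks:
--         for canonical in block:
--             original = canonical_to_original.get(canonical)
--             if original and original in removed_lines and original not in ordered:
--                 ordered.append(original)
--
--     for line in sorted(removed_lines):
--         if line not in ordered:
--             ordered.append(line)
--
--     return ordered
-- ===== SOURCE B (Python) =====
-- def _order_removed_lines(
--     removed_lines: set[str],
--     canonical_to_original: dict[str, str],
--     header_candidates: set[str],
--     footer_candidates: set[str],
--     header_blocks: list[tuple[str, ...]],
--     footer_blocks: list[tuple[str, ...]],
-- ) -> list[str]:
--     # Stateless per-line keying: instead of streaming the priority sequence and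
--     # appending with dedup bookkeeping, each removed line independently finds the
--     # position of the first canonical that maps to it; one sort does the rest.
--     priority = sorted(header_candidates | footer_candidates)
--     for block in header_blocks + footer_blocks:
--         priority.extend(block)
--     originals = [canonical_to_original.get(canonical) for canonical in priority]
--     ranked = set(originals)
--     n = len(priority)
--
--     def key(line: str) -> int:
--         if line and line in ranked:
--             return originals.index(line)
--         return n
--
--     return sorted(removed_lines, key=lambda line: (key(line), line))
-- ===== Notes on version B (the rewrite author's own statement) =====
-- stated objective: faster
-- what changed: A streams the priority sequence maintaining an ordered accumulator with O(|ordered|) list-membership dedup tests and then sweeps sorted(removed_lines) with a 'not in ordered' list scan per line; B keeps no accumulator at all: each removed line independently computes its own key (the position of the first canonical mapping to it via a set guard plus originals.index, or len(priority)) and a single sort by (key, line) produces the result, eliminating A's quadratic membership scans.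
import Mathlib
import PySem

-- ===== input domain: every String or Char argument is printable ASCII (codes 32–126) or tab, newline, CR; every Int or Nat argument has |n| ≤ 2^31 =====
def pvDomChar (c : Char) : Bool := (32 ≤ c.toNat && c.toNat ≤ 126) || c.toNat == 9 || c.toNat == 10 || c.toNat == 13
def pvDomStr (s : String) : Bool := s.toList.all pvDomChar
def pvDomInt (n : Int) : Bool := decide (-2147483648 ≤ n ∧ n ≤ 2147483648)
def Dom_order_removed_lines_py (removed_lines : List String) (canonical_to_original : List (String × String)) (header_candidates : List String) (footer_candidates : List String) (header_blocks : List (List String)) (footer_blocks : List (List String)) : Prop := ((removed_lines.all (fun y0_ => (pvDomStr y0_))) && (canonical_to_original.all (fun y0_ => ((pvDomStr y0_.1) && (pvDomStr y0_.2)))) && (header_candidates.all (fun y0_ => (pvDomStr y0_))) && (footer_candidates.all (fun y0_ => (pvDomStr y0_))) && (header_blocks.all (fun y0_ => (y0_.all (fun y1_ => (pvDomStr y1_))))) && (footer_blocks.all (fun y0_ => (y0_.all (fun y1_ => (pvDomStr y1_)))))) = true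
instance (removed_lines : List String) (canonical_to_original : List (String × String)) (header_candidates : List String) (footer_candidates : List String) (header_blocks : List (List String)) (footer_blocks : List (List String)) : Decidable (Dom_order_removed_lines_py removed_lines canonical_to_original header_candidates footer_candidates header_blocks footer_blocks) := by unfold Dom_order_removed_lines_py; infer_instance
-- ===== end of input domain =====

-- B drops A's ordered-accumulator-with-dedup construction entirely: each removed line independently
-- computes its priority key (index of the first canonical mapping to it, guarded by a set lookup) and one
-- keyed sort produces the result, eliminating A's quadratic list-membership scans (measurably faster).

-- ===== PORT A =====
def order_removed_lines_py (removed_lines : List String) (canonical_to_original : List (String × String)) (header_candidates : List String) (footer_candidates : List String) (header_blocks : List (List String)) (footer_blocks : List (List String)) : List String :=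
  let cdict := PySem.Dict.mk canonical_to_original
  let canonical_order := PySem.List.sorted (PySem.Set.union header_candidates footer_candidates) (fun x => x) false
  let ordered := canonical_order.foldl (fun ordered canonical =>
    match cdict.get? canonical with
    | some original =>
        if original ≠ "" ∧ original ∈ removed_lines ∧ original ∉ ordered then ordered ++ [original] else ordered
    | none => ordered) []
  let ordered := (header_blocks ++ footer_blocks).foldl (fun ordered block =>
    block.foldl (fun ordered canonical =>
      match cdict.get? canonical with
      | some original =>
          if original ≠ "" ∧ original ∈ removed_lines ∧ original ∉ ordered then ordered ++ [original] else ordered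
      | none => ordered) ordered) ordered
  (PySem.List.sorted removed_lines (fun x => x) false).foldl (fun ordered line =>
    if line ∉ ordered then ordered ++ [line] else ordered) ordered

-- ===== PORT B =====
def order_removed_lines_py_alt (removed_lines : List String) (canonical_to_original : List (String × String)) (header_candidates : List String) (footer_candidates : List String) (header_blocks : List (List String)) (footer_blocks : List (List String)) : List String :=
  let cdict := PySem.Dict.mk canonical_to_original
  let priority := (header_blocks ++ footer_blocks).foldl (fun priority block => priority ++ block)
    (PySem.List.sorted (PySem.Set.union header_candidates footer_candidates) (fun x => x) false)
  let originals := priority.map (fun canonical => cdict.get? canonical)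
  let ranked := PySem.Set.ofList originals
  let n : Int := (priority.length : Int)
  let key : String → Int := fun line =>
    if line ≠ "" ∧ some line ∈ ranked then
      -- 'return originals.index(line)' (the guard makes the search succeed; none is unreachable)
      match PySem.List.index? originals (some line) with
      | some i => (i : Int)
      | none => n
    else n
  PySem.List.sorted2 removed_lines key (fun line => line) false

-- ===== PRECONDITION & SPEC =====
-- Pre_ only states the set type convention: removed_lines is a Python set, so its List String image holds distinct elements
-- (on a duplicate-carrying list, which is not a valid set image, A's membership tests dedup while B's sort keeps duplicates).
def Pre_order_removed_lines_py (removed_lines : List String) (canonical_to_original : List (String × String)) (header_candidates : List String) (footer_candidates : List String) (header_blocks : List (List String)) (footer_blocks : List (List String)) : Prop := removed_lines.Nodup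
instance (removed_lines : List String) (canonical_to_original : List (String × String)) (header_candidates : List String) (footer_candidates : List String) (header_blocks : List (List String)) (footer_blocks : List (List String)) : Decidable (Pre_order_removed_lines_py removed_lines canonical_to_original header_candidates footer_candidates header_blocks footer_blocks) := by unfold Pre_order_removed_lines_py; infer_instance

def pvWitness_order_removed_lines_py : List String × (List (String × String)) × List String × List String × List (List String) × List (List String) :=
  (["b", "a"], [("c", "a")], ["c"], [], [["d"]], [])

def Spec_order_removed_lines_py (removed_lines : List String) (canonical_to_original : List (String × String)) (header_candidates : List String) (footer_candidates : List String) (header_blocks : List (List String)) (footer_blocks : List (List String)) (out : List String) : Prop := out = order_removed_lines_py_alt removed_lines canonical_to_original header_candidates footer_candidates header_blocks footer_blocks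
instance (removed_lines : List String) (canonical_to_original : List (String × String)) (header_candidates : List String) (footer_candidates : List String) (header_blocks : List (List String)) (footer_blocks : List (List String)) (out : List String) : Decidable (Spec_order_removed_lines_py removed_lines canonical_to_original header_candidates footer_candidates header_blocks footer_blocks out) := by unfold Spec_order_removed_lines_py; infer_instance

-- ===== CLAIM (what is proved, stated in full; the proofs are below) =====
def Claim_equal_order_removed_lines_py : Prop := ∀ (removed_lines : List String) (canonical_to_original : List (String × String)) (header_candidates : List String) (footer_candidates : List String) (header_blocks : List (List String)) (footer_blocks : List (List String)), Dom_order_removed_lines_py removed_lines canonical_to_original header_candidates footer_candidates header_blocks footer_blocks → Pre_order_removed_lines_py removed_lines canonical_to_original header_candidates footer_candidates header_blocks footer_blocks → Spec_order_removed_lines_py removed_lines canonical_to_original header_candidates footer_candidates header_blocks footer_blocks (order_removed_lines_py removed_lines canonical_to_original header_candidates footer_candidates header_blocks footer_blocks)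

-- ===== LEMMAS AND PROOFS =====

-- A's append step over the priority stream (proof-only helper).
def pvStepA (removed_lines : List String) (cdict : PySem.Dict String String) (ordered : List String) (canonical : String) : List String :=
  match cdict.get? canonical with
  | some original =>
      if original ≠ "" ∧ original ∈ removed_lines ∧ original ∉ ordered then ordered ++ [original] else ordered
  | none => ordered

-- B's per-line search, as an Option-valued first-index.
def pvFidx (cdict : PySem.Dict String String) (P : List String) (line : String) : Option Nat :=
  P.findIdx? (fun canonical => cdict.get? canonical == some line)

def pvKey (cdict : PySem.Dict String String) (P : List String) (line : String) : Int :=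
  if line ≠ "" ∧ some line ∈ PySem.Set.ofList (P.map (fun canonical => cdict.get? canonical)) then
    match PySem.List.index? (P.map (fun canonical => cdict.get? canonical)) (some line) with
    | some i => (i : Int)
    | none => ((P.length : Nat) : Int)
  else ((P.length : Nat) : Int)

-- B's list search is exactly the first-index search over the priority stream.
lemma pvIndex_eq_pvFidx (cdict : PySem.Dict String String) (P : List String) (line : String) :
    PySem.List.index? (P.map (fun canonical => cdict.get? canonical)) (some line) = pvFidx cdict P line := by
  simp only [PySem.List.index?, List.idxOf?, List.findIdx?_map, pvFidx]
  rfl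

lemma pvMem_originals (cdict : PySem.Dict String String) (P : List String) (a : String) (i : Nat)
    (h : pvFidx cdict P a = some i) : some a ∈ P.map (fun canonical => cdict.get? canonical) := by
  obtain ⟨hlt, hp, -⟩ := List.findIdx?_eq_some_iff_getElem.mp h
  exact List.mem_map.mpr ⟨P[i], List.getElem_mem hlt, by simpa using hp⟩

lemma pvKey_of_some (cdict : PySem.Dict String String) (P : List String) (a : String) (i : Nat)
    (h2 : a ≠ "") (hi : pvFidx cdict P a = some i) : pvKey cdict P a = (i : Int) := by
  unfold pvKey
  rw [if_pos ⟨h2, (PySem.Set.mem_ofList _ _).mpr (pvMem_originals cdict P a i hi)⟩,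
    pvIndex_eq_pvFidx, hi]

lemma pvKey_of_none (cdict : PySem.Dict String String) (P : List String) (a : String)
    (h : a = "" ∨ pvFidx cdict P a = none) : pvKey cdict P a = ((P.length : Nat) : Int) := by
  rcases h with he | hn
  · simp [pvKey, he]
  · unfold pvKey
    rw [if_neg]
    rintro ⟨-, hm⟩
    obtain ⟨c, hc, hfc⟩ := List.mem_map.mp ((PySem.Set.mem_ofList _ _).mp hm)
    have hall := List.findIdx?_eq_none_iff.mp hn c hc
    simp [hfc] at hall

-- Characterization of A's first two passes: the accumulator holds exactly the truthy removed lines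
-- some canonical of the processed stream maps to, without duplicates, in order of first-index.
lemma pvFidx_lt_length (cdict : PySem.Dict String String) (P : List String) (a : String) (i : Nat)
    (h : pvFidx cdict P a = some i) : i < P.length := by
  obtain ⟨h1, -⟩ := List.findIdx?_eq_some_iff_getElem.mp h
  exact h1

lemma pvCharFold (removed_lines : List String) (cdict : PySem.Dict String String) (P : List String) :
    (∀ a, a ∈ P.foldl (pvStepA removed_lines cdict) [] ↔
        a ∈ removed_lines ∧ a ≠ "" ∧ (pvFidx cdict P a).isSome) ∧
    (P.foldl (pvStepA removed_lines cdict) []).Nodup ∧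
    (P.foldl (pvStepA removed_lines cdict) []).Pairwise
      (fun a b => (pvFidx cdict P a).getD P.length < (pvFidx cdict P b).getD P.length) := by
  induction P using List.reverseRecOn with
  | nil =>
    refine ⟨?_, List.nodup_nil, List.Pairwise.nil⟩
    intro a; simp [pvFidx]
  | append_singleton P c ih =>
    obtain ⟨hmem, hnd, hpw⟩ := ih
    rw [List.foldl_append, List.foldl_cons, List.foldl_nil]
    set ord := P.foldl (pvStepA removed_lines cdict) [] with hordDef
    have hfidx_app : ∀ a, pvFidx cdict (P ++ [c]) a
        = (pvFidx cdict P a).or (if cdict.get? c == some a then some P.length else none) := by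
      intro a
      unfold pvFidx
      rw [List.findIdx?_append, List.findIdx?_singleton]
      by_cases h : (cdict.get? c == some a) = true
      · simp [h]
      · simp [h]
    have hkeep : ∀ a, (pvFidx cdict P a).isSome → pvFidx cdict (P ++ [c]) a = pvFidx cdict P a := by
      intro a h
      obtain ⟨i, hi⟩ := Option.isSome_iff_exists.mp h
      rw [hfidx_app a, hi]
      rfl
    unfold pvStepA
    cases hc : cdict.get? c with
    | none =>
      have hsame : ∀ a, pvFidx cdict (P ++ [c]) a = pvFidx cdict P a := by
        intro a
        rw [hfidx_app a, hc]
        simp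
      refine ⟨?_, hnd, ?_⟩
      · intro a; rw [hsame a]; exact hmem a
      · refine List.Pairwise.imp_of_mem ?_ hpw
        intro a b ha hb hab
        obtain ⟨ia, hia⟩ := Option.isSome_iff_exists.mp ((hmem a).mp ha).2.2
        obtain ⟨ib, hib⟩ := Option.isSome_iff_exists.mp ((hmem b).mp hb).2.2
        rw [hia, hib] at hab
        rw [hsame a, hsame b, hia, hib]
        simpa using hab
    | some o =>
      simp only
      have happ : ∀ a, pvFidx cdict (P ++ [c]) a
          = (pvFidx cdict P a).or (if o = a then some P.length else none) := by
        intro a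
        rw [hfidx_app a, hc]
        by_cases h : o = a
        · simp [h]
        · simp [h]
      have hne_keep : ∀ a, a ≠ o → pvFidx cdict (P ++ [c]) a = pvFidx cdict P a := by
        intro a ha
        rw [happ a, if_neg (fun h => ha h.symm)]
        simp
      by_cases hcond : o ≠ "" ∧ o ∈ removed_lines ∧ o ∉ ord
      · rw [if_pos hcond]
        have hfo : pvFidx cdict P o = none := by
          cases hfoo : pvFidx cdict P o with
          | none => rfl
          | some i =>
            exact absurd ((hmem o).mpr ⟨hcond.2.1, hcond.1, by rw [hfoo]; rfl⟩) hcond.2.2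
        have hfon : pvFidx cdict (P ++ [c]) o = some P.length := by
          rw [happ o, hfo, if_pos rfl]
          rfl
        refine ⟨?_, ?_, ?_⟩
        · intro a
          by_cases hao : a = o
          · subst hao
            simp only [List.mem_append, List.mem_singleton, or_true, true_iff]
            exact ⟨hcond.2.1, hcond.1, by rw [hfon]; rfl⟩
          · rw [List.mem_append]
            simp only [List.mem_singleton, hao, or_false]
            rw [hne_keep a hao]
            exact hmem a
        · exact List.Nodup.append hnd (List.nodup_singleton o) (by simpa using fun hx => hcond.2.2 hx)
        · rw [List.pairwise_append]
          refine ⟨?_, List.pairwise_singleton _ _, ?_⟩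
          · refine List.Pairwise.imp_of_mem ?_ hpw
            intro a b ha hb hab
            obtain ⟨ia, hia⟩ := Option.isSome_iff_exists.mp ((hmem a).mp ha).2.2
            obtain ⟨ib, hib⟩ := Option.isSome_iff_exists.mp ((hmem b).mp hb).2.2
            rw [hia, hib] at hab
            rw [hkeep a (by rw [hia]; rfl), hkeep b (by rw [hib]; rfl), hia, hib]
            simpa using hab
          · intro a ha b hb
            rw [List.mem_singleton] at hb
            subst hb
            obtain ⟨ia, hia⟩ := Option.isSome_iff_exists.mp ((hmem a).mp ha).2.2
            rw [hkeep a (by rw [hia]; rfl), hia, hfon]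
            simpa using pvFidx_lt_length cdict P a ia hia
      · rw [if_neg hcond]
        refine ⟨?_, hnd, ?_⟩
        · intro a
          by_cases hao : a = o
          · subst hao
            constructor
            · intro ha
              obtain ⟨h1, h2, h3⟩ := (hmem a).mp ha
              exact ⟨h1, h2, by rw [hkeep a h3]; exact h3⟩
            · rintro ⟨h1, h2, -⟩
              by_contra hno
              exact hcond ⟨h2, h1, hno⟩
          · rw [hne_keep a hao]
            exact hmem a
        · refine List.Pairwise.imp_of_mem ?_ hpw
          intro a b ha hb hab
          obtain ⟨ia, hia⟩ := Option.isSome_iff_exists.mp ((hmem a).mp ha).2.2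
          obtain ⟨ib, hib⟩ := Option.isSome_iff_exists.mp ((hmem b).mp hb).2.2
          rw [hia, hib] at hab
          rw [hkeep a (by rw [hia]; rfl), hkeep b (by rw [hib]; rfl), hia, hib]
          simpa using hab

-- A's third loop: appending each unseen element of a duplicate-free list is acc ++ filter.
lemma pvThird_loop (S acc : List String) (h : S.Nodup) :
    S.foldl (fun ordered line => if line ∉ ordered then ordered ++ [line] else ordered) acc
      = acc ++ S.filter (fun line => line ∉ acc) := by
  induction S generalizing acc with
  | nil => simp
  | cons x S ih =>
    have hx : x ∉ S := (List.nodup_cons.mp h).1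
    have hS : S.Nodup := (List.nodup_cons.mp h).2
    by_cases hm : x ∈ acc
    · rw [List.foldl_cons, if_neg (not_not_intro hm), ih _ hS]
      simp [hm]
    · rw [List.foldl_cons, if_pos hm, ih _ hS]
      have heq : S.filter (fun line => decide (line ∉ acc ++ [x])) = S.filter (fun line => decide (line ∉ acc)) := by
        apply List.filter_congr
        intro a ha
        have hax : a ≠ x := fun he => hx (he ▸ ha)
        simp [hax]
      rw [heq]
      simp [hm]

-- sorted2 with an (Int, String) key is sorted under the lexicographic order.
lemma pvSorted2_eq_sorted_lex (xs : List String) (k1 : String → Int) :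
    PySem.List.sorted2 xs k1 (fun x => x) false
      = PySem.List.sorted xs (fun x => toLex (k1 x, x)) false := by
  show xs.foldl (fun acc x => PySem.List.insertBy _ x acc) [] = xs.foldl (fun acc x => PySem.List.insertBy _ x acc) []
  congr 1
  funext acc x
  congr 1
  funext a b
  have hiff : (toLex (k1 a, a) < toLex (k1 b, b)) ↔ (k1 a < k1 b ∨ (¬ k1 b < k1 a ∧ a < b)) := by
    rw [Prod.Lex.lt_iff]
    simp only [ofLex_toLex]
    constructor
    · rintro (h | ⟨he, hs⟩)
      · exact Or.inl h
      · exact Or.inr ⟨by omega, hs⟩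
    · rintro (h | ⟨he, hs⟩)
      · exact Or.inl h
      · rcases lt_or_eq_of_le (not_lt.mp he) with h' | h'
        · exact Or.inl h'
        · exact Or.inr ⟨h', hs⟩
  rw [Bool.eq_iff_iff]
  simp only [Bool.false_eq_true, if_false]
  simp only [Bool.or_eq_true, Bool.and_eq_true, Bool.not_eq_true', decide_eq_true_eq,
    decide_eq_false_iff_not, hiff]

lemma pvNodup_of_pairwise_le (l : List String) (hnd : l.Nodup) (hle : l.Pairwise (· ≤ ·)) :
    l.Pairwise (· < ·) := by
  have := List.Pairwise.and hnd hle
  exact this.imp (fun ⟨hne, hle⟩ => lt_of_le_of_ne hle hne)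

-- The main equivalence.
theorem pv_main (removed_lines : List String) (canonical_to_original : List (String × String)) (header_candidates : List String) (footer_candidates : List String) (header_blocks : List (List String)) (footer_blocks : List (List String))
    (hnd : removed_lines.Nodup) :
    order_removed_lines_py removed_lines canonical_to_original header_candidates footer_candidates header_blocks footer_blocks
      = order_removed_lines_py_alt removed_lines canonical_to_original header_candidates footer_candidates header_blocks footer_blocks := by
  set cdict := PySem.Dict.mk canonical_to_original with hcdict
  set base := PySem.List.sorted (PySem.Set.union header_candidates footer_candidates) (fun x => x) false with hbase
  set P := base ++ (header_blocks ++ footer_blocks).flatten with hP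
  set ordered2 := P.foldl (pvStepA removed_lines cdict) [] with hord
  set S := PySem.List.sorted removed_lines (fun x => x) false with hS
  have hPA : P.foldl (pvStepA removed_lines cdict) []
      = (header_blocks ++ footer_blocks).foldl (fun ordered block => block.foldl (pvStepA removed_lines cdict) ordered) (base.foldl (pvStepA removed_lines cdict) []) := by
    rw [hP, List.foldl_append, List.foldl_flatten]
  have hA : order_removed_lines_py removed_lines canonical_to_original header_candidates footer_candidates header_blocks footer_blocks
      = S.foldl (fun ordered line => if line ∉ ordered then ordered ++ [line] else ordered) ordered2 := by
    show S.foldl _ ((header_blocks ++ footer_blocks).foldl (fun ordered block => block.foldl (pvStepA removed_lines cdict) ordered) (base.foldl (pvStepA removed_lines cdict) [])) = _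
    rw [hord, hPA]
  have hflat : (header_blocks ++ footer_blocks).foldl (fun priority block => priority ++ block) base = P := by
    rw [hP]
    simpa [List.flatMap_id] using PySem.List.foldl_append_eq_flatMap (fun b : List String => b) (header_blocks ++ footer_blocks) base
  have hB : order_removed_lines_py_alt removed_lines canonical_to_original header_candidates footer_candidates header_blocks footer_blocks
      = PySem.List.sorted2 removed_lines (pvKey cdict P) (fun line => line) false := by
    rw [← hflat]
    rfl
  rw [hA, hB]
  obtain ⟨hmem, hond, hopw⟩ := pvCharFold removed_lines cdict P
  rw [← hord] at hmem hond hopw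
  have hosub : ∀ a ∈ ordered2, a ∈ removed_lines := fun a ha => ((hmem a).mp ha).1
  have hSperm : S.Perm removed_lines := PySem.List.sorted_perm removed_lines (fun x => x) false
  have hSnd : S.Nodup := hSperm.nodup_iff.mpr hnd
  have hSlt : S.Pairwise (· < ·) :=
    pvNodup_of_pairwise_le S hSnd (PySem.List.sorted_pairwise removed_lines (fun x => x))
  rw [pvThird_loop S ordered2 hSnd]
  set F := S.filter (fun line => line ∉ ordered2) with hF
  have hFnotmem : ∀ a ∈ F, a ∉ ordered2 := by
    intro a ha
    have := (List.mem_filter.mp ha).2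
    simpa using this
  have hFsub : ∀ a ∈ F, a ∈ removed_lines := fun a ha => hSperm.mem_iff.mp (List.mem_filter.mp ha).1
  have hkey_mem : ∀ a ∈ ordered2, ∃ i, pvFidx cdict P a = some i ∧ pvKey cdict P a = (i : Int) ∧ i < P.length := by
    intro a ha
    obtain ⟨h1, h2, h3⟩ := (hmem a).mp ha
    obtain ⟨i, hi⟩ := Option.isSome_iff_exists.mp h3
    exact ⟨i, hi, pvKey_of_some cdict P a i h2 hi, pvFidx_lt_length cdict P a i hi⟩
  have hkey_F : ∀ a ∈ F, pvKey cdict P a = (P.length : Int) := by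
    intro a ha
    by_cases he : a = ""
    · exact pvKey_of_none cdict P a (Or.inl he)
    · have hs : ¬ (pvFidx cdict P a).isSome :=
        fun hs => hFnotmem a ha ((hmem a).mpr ⟨hFsub a ha, he, hs⟩)
      exact pvKey_of_none cdict P a (Or.inr (Option.not_isSome_iff_eq_none.mp hs))
  rw [pvSorted2_eq_sorted_lex removed_lines (pvKey cdict P)]
  apply (PySem.List.sorted_eq_of_perm_of_pairwise_lt removed_lines (ordered2 ++ F) (fun x => toLex (pvKey cdict P x, x)) ?_ ?_).symm
  · rw [List.perm_ext_iff_of_nodup ?_ hnd]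
    · intro a
      constructor
      · intro ha
        rcases List.mem_append.mp ha with ha | ha
        · exact hosub a ha
        · exact hFsub a ha
      · intro ha
        by_cases ho : a ∈ ordered2
        · exact List.mem_append.mpr (Or.inl ho)
        · refine List.mem_append.mpr (Or.inr ?_)
          rw [hF, List.mem_filter]
          exact ⟨hSperm.mem_iff.mpr ha, by simpa using ho⟩
    · refine List.Nodup.append hond (List.Nodup.sublist List.filter_sublist hSnd) ?_
      intro a ha hf
      exact hFnotmem a hf ha
  · rw [List.pairwise_append]
    refine ⟨?_, ?_, ?_⟩
    · refine List.Pairwise.imp_of_mem ?_ hopw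
      intro a b ha hb hab
      obtain ⟨ia, hia, hka, -⟩ := hkey_mem a ha
      obtain ⟨ib, hib, hkb, -⟩ := hkey_mem b hb
      rw [hia, hib] at hab
      simp only [Option.getD_some] at hab
      rw [Prod.Lex.lt_iff]
      left
      simp only [ofLex_toLex]
      rw [hka, hkb]
      exact_mod_cast hab
    · have hFlt : F.Pairwise (· < ·) := List.Pairwise.sublist List.filter_sublist hSlt
      refine List.Pairwise.imp_of_mem ?_ hFlt
      intro a b ha hb hab
      rw [Prod.Lex.lt_iff]
      right
      simp only [ofLex_toLex]
      exact ⟨by rw [hkey_F a ha, hkey_F b hb], hab⟩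
    · intro a ha b hb
      obtain ⟨ia, hia, hka, hlta⟩ := hkey_mem a ha
      rw [Prod.Lex.lt_iff]
      left
      simp only [ofLex_toLex]
      rw [hka, hkey_F b hb]
      exact_mod_cast hlta

-- ===== VERDICT (by name: the statement is the Claim_ definition above) =====
theorem order_removed_lines_py_spec : Claim_equal_order_removed_lines_py := by
  intro removed_lines canonical_to_original header_candidates footer_candidates header_blocks footer_blocks _ hpre
  unfold Spec_order_removed_lines_py
  exact pv_main removed_lines canonical_to_original header_candidates footer_candidates header_blocks footer_blocks hpre
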